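-- pv_equiv track=rewrite | github.com/Ashay-Nagrani/S26-Intro-to-Robot-Programming | painting_robot/subteam2_driving/subteam2_driving/test_pattern.py | generate_grid_path
-- ===== SOURCE A (Python) =====
-- def generate_grid_path(n):
--     """
--     FIX #1: Generate a column-major serpentine path through an n x n grid.
--
--     Matches the diagram: snake UP one column, step RIGHT, snake DOWN, step RIGHT, etc.
--
--     Coordinates: (col, row) where col=X (right), row=Y (up)
--
--     Example for n=3:
--       col 0: (0,0)->(0,1)->(0,2)   [going up]
--       step:  (0,2)->(1,2)           [step right]
--       col 1: (1,2)->(1,1)->(1,0)   [going down]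
--       step:  (1,0)->(2,0)           [step right]
--       col 2: (2,0)->(2,1)->(2,2)   [going up]
--
--     Full path: [(0,0),(0,1),(0,2),(1,2),(1,1),(1,0),(2,0),(2,1),(2,2)]
--     """
--     path = []
--
--     for col in range(n):
--         if col % 2 == 0:
--             # Even columns: go UP (increasing row/Y)
--             for row in range(n):
--                 path.append((col, row))
--         else:
--             # Odd columns: go DOWN (decreasing row/Y)
--             for row in range(n - 1, -1, -1):
--                 path.append((col, row))
--
--     return path
-- ===== SOURCE B (Python) =====
-- def generate_grid_path(n):
--     total = n * n if n > 0 else 0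
--     path = []
--     for k in range(total):
--         col = k // n
--         p = k % n
--         row = p if col % 2 == 0 else n - 1 - p
--         path.append((col, row))
--     return path
-- ===== Notes on version B (the rewrite author's own statement) =====
-- stated objective: alternative
-- what changed: Replaces the nested column/row loops with forward-vs-backward range branches by a single linear pass over k in range(n*n), recovering col = k // n and the (possibly reflected) row from k % n by arithmetic.
import Mathlib
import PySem

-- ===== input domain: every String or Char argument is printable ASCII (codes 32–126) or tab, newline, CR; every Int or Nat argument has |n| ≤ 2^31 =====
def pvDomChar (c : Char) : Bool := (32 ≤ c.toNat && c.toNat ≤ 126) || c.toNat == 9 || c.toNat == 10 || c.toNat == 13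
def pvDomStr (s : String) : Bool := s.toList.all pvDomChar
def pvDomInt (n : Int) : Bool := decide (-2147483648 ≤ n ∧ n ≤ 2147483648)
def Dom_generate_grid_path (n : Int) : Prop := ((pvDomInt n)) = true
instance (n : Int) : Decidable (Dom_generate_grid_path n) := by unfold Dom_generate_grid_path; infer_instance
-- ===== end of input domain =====

-- B replaces the nested column/row serpentine loops by a single pass over k < n*n,
-- recovering col = k // n and the reflected row from k % n (objective: alternative).

-- ===== PORT A =====
def generate_grid_path (n : Int) : List (Int × Int) :=
  (PySem.List.pyRange 0 n 1).foldl (fun path col =>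
    if PySem.Int.mod col 2 = 0 then
      (PySem.List.pyRange 0 n 1).foldl (fun path row => path ++ [(col, row)]) path
    else
      (PySem.List.pyRange (n - 1) (-1) (-1)).foldl (fun path row => path ++ [(col, row)]) path) []

-- ===== PORT B =====
def generate_grid_path_alt (n : Int) : List (Int × Int) :=
  let total : Int := if n > 0 then n * n else 0
  (PySem.List.pyRange 0 total 1).foldl (fun path k =>
    let col := PySem.Int.floordiv k n
    let p := PySem.Int.mod k n
    let row := if PySem.Int.mod col 2 = 0 then p else n - 1 - p
    path ++ [(col, row)]) []

-- ===== PRECONDITION & SPEC =====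
def Spec_generate_grid_path (n : Int) (out : List (Int × Int)) : Prop := out = generate_grid_path_alt n
instance (n : Int) (out : List (Int × Int)) : Decidable (Spec_generate_grid_path n out) := by unfold Spec_generate_grid_path; infer_instance

-- ===== CLAIM (what is proved, stated in full; the proofs are below) =====
def Claim_equal_generate_grid_path : Prop := ∀ (n : Int), Dom_generate_grid_path n → Spec_generate_grid_path n (generate_grid_path n)

-- ===== LEMMAS AND PROOFS =====

-- normal forms used by the proof
def pvCol (m c : Nat) : List (Int × Int) :=
  if c % 2 = 0 then (List.range m).map (fun j : Nat => ((c : Int), (j : Int)))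
  else (List.range m).map (fun j : Nat => ((c : Int), (m : Int) - 1 - (j : Int)))

def pvCell (m k : Nat) : Int × Int :=
  (((k / m : Nat) : Int),
    if (k / m) % 2 = 0 then ((k % m : Nat) : Int) else (m : Int) - 1 - ((k % m : Nat) : Int))

lemma pv_foldA (n : Int) (l : List Int) (init : List (Int × Int)) :
    l.foldl (fun path col =>
      if PySem.Int.mod col 2 = 0 then
        (PySem.List.pyRange 0 n 1).foldl (fun path row => path ++ [(col, row)]) path
      else
        (PySem.List.pyRange (n - 1) (-1) (-1)).foldl (fun path row => path ++ [(col, row)]) path) init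
    = init ++ l.flatMap (fun col =>
        if PySem.Int.mod col 2 = 0 then
          (PySem.List.pyRange 0 n 1).map (fun row => (col, row))
        else
          (PySem.List.pyRange (n - 1) (-1) (-1)).map (fun row => (col, row))) := by
  induction l generalizing init with
  | nil => simp
  | cons c t ih =>
    simp only [List.foldl_cons, List.flatMap_cons]
    split_ifs with h
    · rw [PySem.List.foldl_append_singleton_eq_map, ih]; simp
    · rw [PySem.List.foldl_append_singleton_eq_map, ih]; simp

lemma pv_colA (m c : Nat) (hm : 0 < m) :
    (if PySem.Int.mod (c : Int) 2 = 0 then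
        ((List.range m).map (fun k : Nat => (k : Int))).map (fun row => ((c : Int), row))
      else
        (PySem.List.pyRange ((m : Int) - 1) (-1) (-1)).map (fun row => ((c : Int), row)))
    = pvCol m c := by
  have hcond : (PySem.Int.mod (c : Int) 2 = 0) ↔ (c % 2 = 0) := by
    rw [show PySem.Int.mod (c : Int) 2 = ((c % 2 : Nat) : Int) from
      by exact_mod_cast PySem.Int.mod_natCast c 2]
    exact_mod_cast Iff.rfl
  unfold pvCol
  by_cases h : c % 2 = 0
  · rw [if_pos (hcond.mpr h), if_pos h, List.map_map]
    exact List.map_congr_left (fun j _ => by simp)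
  · rw [if_neg (fun hc => h (hcond.mp hc)), if_neg h, PySem.List.pyRange_neg_one,
      show ((m : Int) - 1 - (-1)).toNat = m from by omega, List.map_map]
    exact List.map_congr_left (fun j _ => by simp)

lemma pv_key (m : Nat) (hm : 0 < m) (a : Nat) :
    (List.range (a * m)).map (pvCell m) = (List.range a).flatMap (pvCol m) := by
  induction a with
  | zero => simp
  | succ a ih =>
    rw [show (a + 1) * m = a * m + m from by ring, List.range_add, List.map_append, ih,
      List.range_succ, List.flatMap_append]
    congr 1
    simp only [List.flatMap_cons, List.flatMap_nil, List.append_nil, List.map_map]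
    have hdiv : ∀ j, j < m → (a * m + j) / m = a := by
      intro j hj'
      rw [Nat.add_comm, Nat.add_mul_div_right _ _ hm, Nat.div_eq_of_lt hj']
      omega
    have hmodv : ∀ j, j < m → (a * m + j) % m = j := by
      intro j hj'
      rw [Nat.add_comm, Nat.add_mul_mod_self_right, Nat.mod_eq_of_lt hj']
    unfold pvCol
    by_cases h : a % 2 = 0
    · rw [if_pos h]
      refine List.map_congr_left (fun j hj => ?_)
      have hj' : j < m := List.mem_range.mp hj
      simp [pvCell, hdiv j hj', hmodv j hj', h]
    · rw [if_neg h]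
      refine List.map_congr_left (fun j hj => ?_)
      have hj' : j < m := List.mem_range.mp hj
      simp [pvCell, hdiv j hj', hmodv j hj', h]

lemma pv_A_char (m : Nat) (hm : 0 < m) :
    generate_grid_path (m : Int) = (List.range m).flatMap (pvCol m) := by
  unfold generate_grid_path
  rw [pv_foldA, List.nil_append, PySem.List.pyRange_one,
    show ((m : Int) - 0).toNat = m from by omega, List.flatMap_map]
  congr 1
  funext c
  simp only [zero_add]
  exact pv_colA m c hm

lemma pv_B_char (m : Nat) (hm : 0 < m) :
    generate_grid_path_alt (m : Int) = (List.range (m * m)).map (pvCell m) := by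
  unfold generate_grid_path_alt
  have hpos : (m : Int) > 0 := by exact_mod_cast hm
  rw [if_pos hpos, PySem.List.foldl_append_singleton_eq_map, List.nil_append,
    PySem.List.pyRange_one]
  have hlen : ((m : Int) * (m : Int) - 0).toNat = m * m := by
    have : ((m : Int) * (m : Int)) = ((m * m : Nat) : Int) := by push_cast; ring
    omega
  rw [hlen, List.map_map]
  apply List.map_congr_left
  intro k hk
  have hdiv : PySem.Int.floordiv (k : Int) (m : Int) = (((k / m : Nat)) : Int) := by
    exact_mod_cast PySem.Int.floordiv_natCast k m
  have hmodv : PySem.Int.mod (k : Int) (m : Int) = (((k % m : Nat)) : Int) := by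
    exact_mod_cast PySem.Int.mod_natCast k m
  have hmod2 : PySem.Int.mod (((k / m : Nat)) : Int) 2 = (((k / m % 2 : Nat)) : Int) := by
    exact_mod_cast PySem.Int.mod_natCast (k / m) 2
  simp only [Function.comp, zero_add, hdiv, hmodv, hmod2]
  unfold pvCell
  by_cases h : k / m % 2 = 0
  · rw [if_pos h, if_pos (by exact_mod_cast congrArg (Nat.cast : Nat → Int) h)]
  · rw [if_neg h, if_neg (by exact_mod_cast fun hc => h (by exact_mod_cast hc))]

-- ===== VERDICT (by name: the statement is the Claim_ definition above) =====
theorem generate_grid_path_spec : Claim_equal_generate_grid_path := by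
  intro n _
  unfold Spec_generate_grid_path
  by_cases hn : 0 < n
  · obtain ⟨m, rfl⟩ : ∃ m : Nat, n = (m : Int) := ⟨n.toNat, by omega⟩
    have hm : 0 < m := by exact_mod_cast hn
    rw [pv_A_char m hm, pv_B_char m hm, pv_key m hm m]
  · have h1 : PySem.List.pyRange 0 n 1 = [] := PySem.List.pyRange_one_eq_nil (by omega)
    have h2 : (if n > 0 then n * n else (0 : Int)) = 0 := if_neg (by omega)
    have h3 : PySem.List.pyRange 0 0 1 = [] := PySem.List.pyRange_one_eq_nil (by omega)
    simp [generate_grid_path, generate_grid_path_alt, h1, h2, h3]
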